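-- pv_equiv track=rewrite | github.com/Gaonkar121632/my-competitive-soln | tripple.py | findValTwo
-- ===== SOURCE A (Python) =====
-- def findValTwo(arr, indx,lowBound):
--     i = 0
--     # j=0
--     flag = True
--     while flag:
--         i += 1
--         if (indx+i)<len(arr) and arr[indx+i] != (indx+i)+1:
--             return indx+1
--         elif (indx-i)>lowBound and arr[indx-i] != (indx-i)+1:
--             return indx-1
--         if (indx+i)>=len(arr) and (indx-i)<=lowBound:
--             return -1
-- ===== SOURCE B (Python) =====
-- def findValTwo(arr, indx, lowBound):
--     n = len(arr)
--     # rightward pass: smallest offset i with indx+i in the right range and out of place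
--     rOff = None
--     i = 1
--     while indx + i < n:
--         if arr[indx + i] != indx + i + 1:
--             rOff = i
--             break
--         i += 1
--     # leftward pass: smallest offset i with indx-i above lowBound and out of place
--     # (no point looking past rOff: the right side wins ties)
--     lOff = None
--     i = 1
--     while indx - i > lowBound and (rOff is None or i < rOff):
--         if arr[indx - i] != indx - i + 1:
--             lOff = i
--             break
--         i += 1
--     # decide from the two offsets
--     if rOff is None and lOff is None:
--         return -1
--     if lOff is None or (rOff is not None and rOff <= lOff):
--         return indx + 1
--     return indx - 1
-- ===== Notes on version B (the rewrite author's own statement) =====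
-- stated objective: alternative
-- what changed: Replaces A's single interleaved expanding while-loop with two independent directional passes (a rightward scan recording the first out-of-place offset rOff, a leftward scan recording lOff) followed by one final comparison that resolves ties in favour of the right side.
import Mathlib
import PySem

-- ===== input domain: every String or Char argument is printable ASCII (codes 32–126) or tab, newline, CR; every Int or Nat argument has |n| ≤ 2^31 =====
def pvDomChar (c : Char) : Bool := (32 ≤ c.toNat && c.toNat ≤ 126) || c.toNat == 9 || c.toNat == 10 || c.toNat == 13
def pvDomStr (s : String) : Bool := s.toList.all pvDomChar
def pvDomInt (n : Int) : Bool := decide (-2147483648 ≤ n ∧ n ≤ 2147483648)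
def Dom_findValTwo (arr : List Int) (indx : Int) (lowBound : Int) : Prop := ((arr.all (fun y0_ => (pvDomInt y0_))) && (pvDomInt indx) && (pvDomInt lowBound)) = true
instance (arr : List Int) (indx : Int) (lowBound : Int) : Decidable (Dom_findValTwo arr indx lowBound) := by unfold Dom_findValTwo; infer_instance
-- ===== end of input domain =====

-- B replaces A's single interleaved expanding loop with two independent directional scans
-- (rightward offset rOff, leftward offset lOff) plus one final comparison; equal cost, different decomposition.


-- ===== PORT A =====
-- A's while-loop, made total with fuel (the fuel bound always suffices: the loop stops once
-- i ≥ max(len-indx, indx-lowBound)).  arr[k] is ported as pyGetD arr k 0: Pre_findValTwo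
-- excludes exactly the inputs on which the Python access raises IndexError (pyGet? = none).
def pvLoopA (arr : List Int) (indx : Int) (lowBound : Int) : Int → Nat → Int
  | _, 0 => 0   -- unreachable: fuel is chosen large enough
  | i, fuel + 1 =>
    -- i += 1 happens first; the incremented counter is written i + 1 below
    if indx + (i + 1) < (arr.length : Int) ∧ PySem.List.pyGetD arr (indx + (i + 1)) 0 ≠ indx + (i + 1) + 1 then
      indx + 1
    else if lowBound < indx - (i + 1) ∧ PySem.List.pyGetD arr (indx - (i + 1)) 0 ≠ indx - (i + 1) + 1 then
      indx - 1
    else if (arr.length : Int) ≤ indx + (i + 1) ∧ indx - (i + 1) ≤ lowBound then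
      -1
    else
      pvLoopA arr indx lowBound (i + 1) fuel

def findValTwo (arr : List Int) (indx : Int) (lowBound : Int) : Int :=
  pvLoopA arr indx lowBound 0
    (((arr.length : Int) - indx).toNat + (indx - lowBound).toNat + 1)

-- ===== PORT B =====
-- rightward pass: smallest offset i with indx+i < len and arr[indx+i] out of place
def pvRScan (arr : List Int) (indx : Int) (i : Int) : Option Int :=
  if h : indx + i < (arr.length : Int) then
    if PySem.List.pyGetD arr (indx + i) 0 ≠ indx + i + 1 then some i
    else pvRScan arr indx (i + 1)
  else none
termination_by ((arr.length : Int) - indx - i).toNat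
decreasing_by omega

-- leftward pass, not looking past rOff (the right side wins ties)
def pvLScan (arr : List Int) (indx : Int) (lowBound : Int) (r : Option Int) (i : Int) : Option Int :=
  if h : lowBound < indx - i ∧ ∀ j ∈ r, i < j then
    if PySem.List.pyGetD arr (indx - i) 0 ≠ indx - i + 1 then some i
    else pvLScan arr indx lowBound r (i + 1)
  else none
termination_by (indx - lowBound - i).toNat
decreasing_by omega

-- final decision from the two offsets
def pvCombine (indx : Int) (r l : Option Int) : Int :=
  match r, l with
  | none, none => -1
  | some _, none => indx + 1
  | none, some _ => indx - 1
  | some a, some b => if a ≤ b then indx + 1 else indx - 1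

def findValTwo_alt (arr : List Int) (indx : Int) (lowBound : Int) : Int :=
  let r := pvRScan arr indx 1
  let l := pvLScan arr indx lowBound r 1
  pvCombine indx r l

-- ===== PRECONDITION & SPEC =====
-- Pre_ excludes exactly the inputs on which the Python A raises IndexError: a first right access
-- below -len, a first left access at or above len, or a leftward run of in-place entries that
-- descends past -len while lowBound lies below -len-1 and the right side never fires in time.
def Pre_findValTwo (arr : List Int) (indx : Int) (lowBound : Int) : Prop :=
  ¬ (indx + 1 < -(arr.length : Int)) ∧
  ¬ ((arr.length : Int) ≤ indx - 1 ∧ lowBound < indx - 1) ∧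
  ¬ (lowBound < -(arr.length : Int) - 1 ∧ lowBound < indx - 1 ∧ indx - 1 < (arr.length : Int) ∧
     (∀ q ∈ PySem.List.pyRange (-(arr.length : Int)) indx 1,
        PySem.List.pyGet? arr q = some (q + 1)) ∧
     (∀ i ∈ PySem.List.pyRange 1 (max 1 (indx + (arr.length : Int) + 1) + 1) 1,
        indx + i < (arr.length : Int) → PySem.List.pyGet? arr (indx + i) = some (indx + i + 1)))
instance (arr : List Int) (indx : Int) (lowBound : Int) : Decidable (Pre_findValTwo arr indx lowBound) := by unfold Pre_findValTwo; infer_instance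

def pvWitness_findValTwo : List Int × Int × Int := ([1, 2, 3], 1, -1)

def Spec_findValTwo (arr : List Int) (indx : Int) (lowBound : Int) (out : Int) : Prop := out = findValTwo_alt arr indx lowBound
instance (arr : List Int) (indx : Int) (lowBound : Int) (out : Int) : Decidable (Spec_findValTwo arr indx lowBound out) := by unfold Spec_findValTwo; infer_instance

-- ===== CLAIM (what is proved, stated in full; the proofs are below) =====
def Claim_equal_findValTwo : Prop := ∀ (arr : List Int) (indx : Int) (lowBound : Int), Dom_findValTwo arr indx lowBound → Pre_findValTwo arr indx lowBound → Spec_findValTwo arr indx lowBound (findValTwo arr indx lowBound)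

-- ===== LEMMAS AND PROOFS =====

theorem pvRScan_ge (arr : List Int) (indx : Int) : ∀ (i j : Int),
    pvRScan arr indx i = some j → i ≤ j := by
  intro i
  generalize hm : ((arr.length : Int) - indx - i).toNat = n
  induction n generalizing i with
  | zero =>
    intro j h
    rw [pvRScan, dif_neg (by omega)] at h
    exact absurd h (by simp)
  | succ n ih =>
    intro j h
    rw [pvRScan] at h
    by_cases hc : indx + i < (arr.length : Int)
    · rw [dif_pos hc] at h
      by_cases hm2 : PySem.List.pyGetD arr (indx + i) 0 ≠ indx + i + 1
      · rw [if_pos hm2] at h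
        simp only [Option.some.injEq] at h; omega
      · rw [if_neg hm2] at h
        have := ih (i + 1) (by omega) j h
        omega
    · rw [dif_neg hc] at h; exact absurd h (by simp)

theorem pvRScan_stop (arr : List Int) (indx : Int) (i : Int)
    (h : (arr.length : Int) ≤ indx + i) : pvRScan arr indx i = none := by
  rw [pvRScan, dif_neg (by omega)]

theorem pvLScan_stop (arr : List Int) (indx : Int) (lowBound : Int) (r : Option Int) (i : Int)
    (h : indx - i ≤ lowBound) : pvLScan arr indx lowBound r i = none := by
  rw [pvLScan, dif_neg]
  intro hc; exact absurd hc.1 (by omega)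

theorem pvRScan_succ (arr : List Int) (indx : Int) (i : Int)
    (hc : indx + i < (arr.length : Int))
    (hm : ¬ PySem.List.pyGetD arr (indx + i) 0 ≠ indx + i + 1) :
    pvRScan arr indx i = pvRScan arr indx (i + 1) := by
  conv_lhs => rw [pvRScan]
  rw [dif_pos hc, if_neg hm]

theorem pvLScan_succ (arr : List Int) (indx : Int) (lowBound : Int) (r : Option Int) (i : Int)
    (hb : lowBound < indx - i) (hge : ∀ j ∈ r, i < j)
    (hm : ¬ PySem.List.pyGetD arr (indx - i) 0 ≠ indx - i + 1) :
    pvLScan arr indx lowBound r i = pvLScan arr indx lowBound r (i + 1) := by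
  conv_lhs => rw [pvLScan]
  rw [dif_pos ⟨hb, hge⟩, if_neg hm]

theorem pvLoop_eq (arr : List Int) (indx : Int) (lowBound : Int) : ∀ (fuel : Nat) (i : Int),
    (arr.length : Int) - indx ≤ i + 1 + fuel → indx - lowBound ≤ i + 1 + fuel →
    pvLoopA arr indx lowBound i (fuel + 1) =
      pvCombine indx (pvRScan arr indx (i + 1))
        (pvLScan arr indx lowBound (pvRScan arr indx (i + 1)) (i + 1)) := by
  intro fuel
  induction fuel with
  | zero =>
    intro i h1 h2
    have hr : pvRScan arr indx (i + 1) = none := pvRScan_stop arr indx (i + 1) (by omega)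
    have hl : pvLScan arr indx lowBound none (i + 1) = none :=
      pvLScan_stop arr indx lowBound none (i + 1) (by omega)
    conv_lhs => rw [pvLoopA]
    rw [if_neg (fun hx => absurd hx.1 (by omega)),
        if_neg (fun hx => absurd hx.1 (by omega)),
        if_pos ⟨by omega, by omega⟩, hr, hl]
    rfl
  | succ fuel ih =>
    intro i h1 h2
    conv_lhs => rw [pvLoopA]
    by_cases hG1 : indx + (i + 1) < (arr.length : Int) ∧
        PySem.List.pyGetD arr (indx + (i + 1)) 0 ≠ indx + (i + 1) + 1
    · rw [if_pos hG1]
      have hr : pvRScan arr indx (i + 1) = some (i + 1) := by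
        rw [pvRScan, dif_pos hG1.1, if_pos hG1.2]
      have hl : pvLScan arr indx lowBound (some (i + 1)) (i + 1) = none := by
        rw [pvLScan, dif_neg]
        intro hx
        have := hx.2 (i + 1) rfl
        omega
      rw [hr, hl]
      rfl
    · rw [if_neg hG1]
      have hreq : pvRScan arr indx (i + 1) = pvRScan arr indx (i + 1 + 1) := by
        by_cases hc : indx + (i + 1) < (arr.length : Int)
        · exact pvRScan_succ arr indx (i + 1) hc (fun hne => hG1 ⟨hc, hne⟩)
        · rw [pvRScan_stop arr indx (i + 1) (by omega),
              pvRScan_stop arr indx (i + 1 + 1) (by omega)]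
      have hge : ∀ j ∈ pvRScan arr indx (i + 1), i + 1 < j := by
        rw [hreq]
        intro j hj
        have := pvRScan_ge arr indx (i + 1 + 1) j hj
        omega
      by_cases hG2 : lowBound < indx - (i + 1) ∧
          PySem.List.pyGetD arr (indx - (i + 1)) 0 ≠ indx - (i + 1) + 1
      · rw [if_pos hG2]
        have hl : pvLScan arr indx lowBound (pvRScan arr indx (i + 1)) (i + 1) = some (i + 1) := by
          rw [pvLScan, dif_pos ⟨hG2.1, hge⟩, if_pos hG2.2]
        rw [hl]
        rcases hr : pvRScan arr indx (i + 1) with _ | j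
        · rfl
        · have hj := hge j (by rw [hr]; rfl)
          simp only [pvCombine]
          rw [if_neg (by omega)]
      · rw [if_neg hG2]
        by_cases hG3 : (arr.length : Int) ≤ indx + (i + 1) ∧ indx - (i + 1) ≤ lowBound
        · rw [if_pos hG3,
              pvRScan_stop arr indx (i + 1) (by omega),
              pvLScan_stop arr indx lowBound none (i + 1) (by omega)]
          rfl
        · rw [if_neg hG3, ih (i + 1) (by omega) (by omega), ← hreq]
          congr 1
          by_cases hb : lowBound < indx - (i + 1)
          · exact (pvLScan_succ arr indx lowBound (pvRScan arr indx (i + 1)) (i + 1) hb hge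
              (fun hne => hG2 ⟨hb, hne⟩)).symm
          · rw [pvLScan_stop arr indx lowBound _ (i + 1) (by omega),
                pvLScan_stop arr indx lowBound _ (i + 1 + 1) (by omega)]

theorem findValTwo_eq_alt (arr : List Int) (indx : Int) (lowBound : Int) :
    findValTwo arr indx lowBound = findValTwo_alt arr indx lowBound := by
  unfold findValTwo findValTwo_alt
  have h := pvLoop_eq arr indx lowBound
    (((arr.length : Int) - indx).toNat + (indx - lowBound).toNat) 0 (by omega) (by omega)
  simpa using h

-- ===== VERDICT (by name: the statement is the Claim_ definition above) =====
theorem findValTwo_spec : Claim_equal_findValTwo := by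
  intro arr indx lowBound _hdom _hpre
  unfold Spec_findValTwo
  exact findValTwo_eq_alt arr indx lowBound
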